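-- pv_equiv track=rewrite | github.com/filak/MessyProps | props_check.py | escape_spaces
-- ===== SOURCE A (Python) =====
-- def escape_spaces(input_string):
--     if ' ' not in input_string:
--         return input_string
--
--     result = ''
--
--     for i, char in enumerate(input_string):
--         if char == ' ':
--             if i == 0 or input_string[i - 1] != '\\':
--                 result += '\\ '
--             else:
--                 result += char
--         else:
--             result += char
--
--     return result
-- ===== SOURCE B (Python) =====
-- import re
--
-- def escape_spaces(input_string):
--     # One regex substitution: a space not preceded by a backslash becomes '\ '.
--     return re.sub(r'(?<!\\) ', r'\\ ', input_string)
-- ===== Notes on version B (the rewrite author's own statement) =====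
-- stated objective: idiomatic
-- what changed: Replaces the explicit enumerate loop with string accumulator (guarded by an 'in' pre-check) by a single regex substitution with a negative lookbehind.
import Mathlib
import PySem

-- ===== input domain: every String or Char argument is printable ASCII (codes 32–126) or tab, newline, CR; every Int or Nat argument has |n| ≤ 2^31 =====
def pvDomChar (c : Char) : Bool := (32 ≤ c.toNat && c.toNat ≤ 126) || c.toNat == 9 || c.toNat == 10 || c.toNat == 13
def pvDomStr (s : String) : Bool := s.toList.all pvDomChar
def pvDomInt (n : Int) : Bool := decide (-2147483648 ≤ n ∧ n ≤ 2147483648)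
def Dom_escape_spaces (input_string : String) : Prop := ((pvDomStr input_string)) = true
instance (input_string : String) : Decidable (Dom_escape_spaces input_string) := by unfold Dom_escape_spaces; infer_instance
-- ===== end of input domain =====

-- B replaces A's index-based loop with accumulator by one regex substitution (negative lookbehind); equivalence is proved on all strings.

-- ===== PORT A =====
-- Literal port: early return when no space; else build the result by appending per character,
-- consulting the ORIGINAL string at index i-1.
def escape_spaces (input_string : String) : String :=
  if ¬ (' ' ∈ input_string.toList) then input_string
  else
    String.ofList ((PySem.List.enumerate input_string.toList).foldl
      (fun acc (p : Int × Char) =>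
        acc ++ (if p.2 = ' ' then
                  (if p.1 = 0 ∨ PySem.Str.pyGet? input_string (p.1 - 1) ≠ some '\\' then ['\\', ' '] else [p.2])
                else [p.2])) [])

-- ===== PORT B =====
-- Hand port of re.sub(r'(?<!\\) ', r'\\ ', s) for THIS fixed pattern: exact — the regex scans left to
-- right and replaces each space whose preceding character in the original string is not a backslash.
def pvReSubGo : Option Char → List Char → List Char
  | _, [] => []
  | prev, c :: rest => (if c = ' ' ∧ prev ≠ some '\\' then ['\\', ' '] else [c]) ++ pvReSubGo (some c) rest

def escape_spaces_alt (input_string : String) : String :=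
  String.ofList (pvReSubGo none input_string.toList)

-- ===== PRECONDITION & SPEC =====
def Spec_escape_spaces (input_string : String) (out : String) : Prop := out = escape_spaces_alt input_string
instance (input_string : String) (out : String) : Decidable (Spec_escape_spaces input_string out) := by unfold Spec_escape_spaces; infer_instance

-- ===== CLAIM (what is proved, stated in full; the proofs are below) =====
def Claim_equal_escape_spaces : Prop := ∀ (input_string : String), Dom_escape_spaces input_string → Spec_escape_spaces input_string (escape_spaces input_string)

-- ===== LEMMAS AND PROOFS =====

-- If the suffix contains no space, B's scan copies it unchanged.
theorem pvReSubGo_no_space (l : List Char) (prev : Option Char) (h : ¬ (' ' ∈ l)) :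
    pvReSubGo prev l = l := by
  induction l generalizing prev with
  | nil => rfl
  | cons c rest ih =>
    simp only [List.mem_cons, not_or] at h
    simp [pvReSubGo, Ne.symm h.1, ih _ h.2]

-- Main invariant: processing the suffix after a processed prefix `pre`, A's per-index decision
-- (looking up index pre.length - 1 in the original string) agrees with B's carried previous char.
theorem pvMain (s : String) (l pre : List Char) (hs : s.toList = pre ++ l) :
    (PySem.List.enumerate l (pre.length : Int)).flatMap
      (fun (p : Int × Char) =>
        (if p.2 = ' ' then
          (if p.1 = 0 ∨ PySem.Str.pyGet? s (p.1 - 1) ≠ some '\\' then ['\\', ' '] else [p.2])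
        else [p.2])) = pvReSubGo pre.getLast? l := by
  induction l generalizing pre with
  | nil => simp [PySem.List.enumerate, pvReSubGo]
  | cons c rest ih =>
    rw [PySem.List.enumerate_cons, List.flatMap_cons]
    have htail := ih (pre ++ [c]) (by simpa using hs)
    simp only [List.length_append, List.length_singleton, List.getLast?_append_cons,
      List.getLast?_singleton] at htail
    have hcast : ((pre.length : Int) + 1) = ((pre.length + 1 : Nat) : Int) := by push_cast; ring
    rw [pvReSubGo, ← htail, hcast]
    congr 1
    -- head element: A's condition = B's condition
    by_cases hc : c = ' '
    · subst hc
      rcases pre.eq_nil_or_concat with hpre | ⟨q, d, hpre⟩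
      · subst hpre; simp [PySem.Str.pyGet?]
      · rw [List.concat_eq_append] at hpre
        subst hpre
        have hidx : PySem.Str.pyGet? s (((q ++ [d]).length : Int) - 1) = some d := by
          rw [PySem.Str.pyGet?_eq, hs]
          have : ((q ++ [d]).length : Int) - 1 = (q.length : Int) := by
            simp [List.length_append]
          rw [this]
          have hassoc : q ++ [d] ++ ' ' :: rest = q ++ (d :: ' ' :: rest) := by simp
          rw [hassoc]
          simp only [PySem.Chars.pyGet?]
          exact PySem.List.pyGet?_append_length _ _ _
        have hne : ((q ++ [d]).length : Int) ≠ 0 := by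
          have : 0 < (q ++ [d]).length := by simp
          omega
        rw [hidx]
        simp only [List.getLast?_concat]
        by_cases hd : d = '\\'
        · subst hd; simp; omega
        · simp [hd, Ne.symm]
    · simp [hc]

-- ===== VERDICT (by name: the statement is the Claim_ definition above) =====
theorem escape_spaces_spec : Claim_equal_escape_spaces := by
  intro s _
  unfold Spec_escape_spaces escape_spaces escape_spaces_alt
  by_cases h : ' ' ∈ s.toList
  · rw [if_neg (by simpa using h)]
    rw [PySem.List.foldl_append_eq_flatMap]
    have := pvMain s s.toList [] (by simp)
    simpa using congrArg String.ofList this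
  · rw [if_pos (by simpa using h), pvReSubGo_no_space _ _ h, String.ofList_toList]
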